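-- pv_equiv track=rewrite | github.com/Yekyaa-/python3storage | Classes/BoxDraw.py | displayNumbersHorizontal
-- ===== SOURCE A (Python) =====
-- def displayNumbersHorizontal(number=None, blank=' ', indent=0):
--     '''
--     Print a horizontal bar using one column per number, one line per digit
--     such that calling self.hDisplay(71) prints the following:
--     00000000001111111111222222222233333333334444444444555555555566666666667
--     01234567890123456789012345678901234567890123456789012345678901234567890
--     '''
--
--     # Default value of number is box width
--     if number is None:
--         return ''
--
--     # Setup indenting
--     indent_spaces = ' ' * indent
--
--     # Establish length of number as string
--     string_length_value = len(str(number - 1))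
--
--     # Setup return value
--     return_value = ''
--
--     # Do digits in order as powers of 10 (10**3, 10**2, 10**1)
--     for digit_index in range(string_length_value - 1, -1, -1):
--         # Add optional indenting
--         return_value += indent_spaces
--
--         # for each line, display 0 - digit for width characters
--         for column_counter in range(0, number):
--             # 0 // 10^0 = 100 % 10 = 0
--             this_digit = (column_counter // (10 ** digit_index)) % 10
--
--             print_digit = str(this_digit)
--             if digit_index != 0 and this_digit == 0:
--                 print_digit = str(blank)
--             return_value += print_digit
--
--         return_value += '\n'
--
--     return return_value
-- ===== SOURCE B (Python) =====
-- def displayNumbersHorizontal(number=None, blank=' ', indent=0):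
--     if number is None:
--         return ''
--     width = len(str(number - 1))
--     cols = [str(c).zfill(width) for c in range(number)]
--     pre = ' ' * indent
--     rows = []
--     for r in range(width):
--         cells = []
--         for s in cols:
--             ch = s[r]
--             cells.append(str(blank) if r != width - 1 and ch == '0' else ch)
--         rows.append(pre + ''.join(cells))
--     return '\n'.join(rows) + '\n'
-- ===== Notes on version B (the rewrite author's own statement) =====
-- stated objective: idiomatic
-- what changed: B precomputes each column's zero-filled decimal string once (str(c).zfill(width)) and projects every output row out of those strings by index, building a list of rows joined at the end, instead of A's per-cell floor-division/modulo digit arithmetic inside a string-concatenation accumulator.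
import Mathlib
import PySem

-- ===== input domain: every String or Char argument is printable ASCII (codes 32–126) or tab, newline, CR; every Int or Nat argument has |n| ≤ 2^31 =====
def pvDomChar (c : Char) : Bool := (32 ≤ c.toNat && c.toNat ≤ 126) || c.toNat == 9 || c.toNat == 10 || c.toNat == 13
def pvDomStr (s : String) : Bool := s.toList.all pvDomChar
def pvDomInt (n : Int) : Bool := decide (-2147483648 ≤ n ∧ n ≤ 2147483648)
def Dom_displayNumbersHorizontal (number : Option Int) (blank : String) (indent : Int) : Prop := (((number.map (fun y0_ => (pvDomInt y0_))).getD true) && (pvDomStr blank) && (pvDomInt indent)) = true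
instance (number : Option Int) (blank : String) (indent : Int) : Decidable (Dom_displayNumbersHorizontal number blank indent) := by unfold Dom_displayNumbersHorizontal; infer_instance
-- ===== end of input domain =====

-- B precomputes each column's zero-filled decimal string once and projects the rows out of it,
-- instead of A's per-cell power-of-ten arithmetic; objective: idiomatic, same asymptotic cost.

-- ===== PORT A =====
def displayNumbersHorizontal (number : Option Int) (blank : String) (indent : Int) : String :=
  match number with
  | none => ""
  | some n =>
    -- indent_spaces = ' ' * indent  (empty for indent ≤ 0, exact)
    let indentSpaces : List Char := List.replicate indent.toNat ' '
    -- string_length_value = len(str(number - 1))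
    let stringLengthValue : Nat := (PySem.Int.toChars (n - 1)).length
    let returnValue : List Char :=
      -- for digit_index in range(string_length_value - 1, -1, -1):
      (PySem.List.pyRange ((stringLengthValue : Int) - 1) (-1) (-1)).foldl (fun rv d =>
        let rv := rv ++ indentSpaces
        -- for column_counter in range(0, number):
        let rv := (PySem.List.pyRange 0 n 1).foldl (fun rv c =>
          -- this_digit = (column_counter // (10 ** digit_index)) % 10; d ≥ 0 on every
          -- iteration (range stops at 0), so 10 ** d is (10:Int) ^ d.toNat exactly
          let thisDigit := PySem.Int.mod (PySem.Int.floordiv c ((10:Int) ^ d.toNat)) 10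
          let printDigit := if d ≠ 0 ∧ thisDigit = 0 then blank.toList else PySem.Int.toChars thisDigit
          rv ++ printDigit) rv
        rv ++ ['\n']) []
    String.ofList returnValue

-- ===== PORT B =====
def displayNumbersHorizontal_alt (number : Option Int) (blank : String) (indent : Int) : String :=
  match number with
  | none => ""
  | some n =>
    let width : Nat := (PySem.Int.toChars (n - 1)).length
    -- cols = [str(c).zfill(width) for c in range(number)]
    let cols : List (List Char) :=
      (PySem.List.pyRange 0 n 1).map (fun c => PySem.Chars.zfill (PySem.Int.toChars c) (width : Int))
    let pre : List Char := List.replicate indent.toNat ' '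
    let rows : List (List Char) :=
      (List.range width).map (fun (r : Nat) =>
        pre ++ (cols.map (fun s =>
          -- ch = s[r]; in range: every column string has length ≥ width
          let ch := PySem.List.pyGetD s (r : Int) ' '
          if r ≠ width - 1 ∧ ch = '0' then blank.toList else [ch])).flatten)
    -- '\n'.join(rows) + '\n'
    String.ofList (List.intercalate ['\n'] rows ++ ['\n'])

-- ===== PRECONDITION & SPEC =====
def Spec_displayNumbersHorizontal (number : Option Int) (blank : String) (indent : Int) (out : String) : Prop := out = displayNumbersHorizontal_alt number blank indent
instance (number : Option Int) (blank : String) (indent : Int) (out : String) : Decidable (Spec_displayNumbersHorizontal number blank indent out) := by unfold Spec_displayNumbersHorizontal; infer_instance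

-- ===== CLAIM (what is proved, stated in full; the proofs are below) =====
def Claim_equal_displayNumbersHorizontal : Prop := ∀ (number : Option Int) (blank : String) (indent : Int), Dom_displayNumbersHorizontal number blank indent → Spec_displayNumbersHorizontal number blank indent (displayNumbersHorizontal number blank indent)

-- ===== LEMMAS AND PROOFS =====

-- toDigitsCore: the accumulator is an append, and the fuel does not matter once sufficient
theorem pv_toDigitsCore_acc (f n : Nat) (acc : List Char) (hf : n < f) :
    Nat.toDigitsCore 10 f n acc = Nat.toDigitsCore 10 f n [] ++ acc := by
  induction n using Nat.strong_induction_on generalizing f acc with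
  | _ n ih =>
    match f with
    | f + 1 =>
      simp only [Nat.toDigitsCore]
      by_cases h : n / 10 = 0
      · simp [h]
      · simp only [h, if_false]
        have hlt : n / 10 < n := Nat.div_lt_self (Nat.pos_of_ne_zero (by omega)) (by omega)
        rw [ih (n / 10) hlt f _ (by omega), ih (n / 10) hlt f [(n % 10).digitChar] (by omega)]
        simp

theorem pv_toDigitsCore_fuel (f₁ f₂ n : Nat) (h₁ : n < f₁) (h₂ : n < f₂) :
    Nat.toDigitsCore 10 f₁ n [] = Nat.toDigitsCore 10 f₂ n [] := by
  induction n using Nat.strong_induction_on generalizing f₁ f₂ with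
  | _ n ih =>
    match f₁, f₂ with
    | f₁ + 1, f₂ + 1 =>
      simp only [Nat.toDigitsCore]
      by_cases h : n / 10 = 0
      · simp [h]
      · simp only [h, if_false]
        have hlt : n / 10 < n := Nat.div_lt_self (Nat.pos_of_ne_zero (by omega)) (by omega)
        rw [pv_toDigitsCore_acc f₁ (n / 10) _ (by omega), pv_toDigitsCore_acc f₂ (n / 10) _ (by omega),
          ih (n / 10) hlt f₁ f₂ (by omega) (by omega)]

theorem pv_toDigits_lt (m : Nat) (h : m < 10) : Nat.toDigits 10 m = [Nat.digitChar m] := by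
  simp [Nat.toDigits, Nat.toDigitsCore, Nat.div_eq_of_lt h, Nat.mod_eq_of_lt h]

theorem pv_toDigits_ge (m : Nat) (h : 10 ≤ m) :
    Nat.toDigits 10 m = Nat.toDigits 10 (m / 10) ++ [Nat.digitChar (m % 10)] := by
  have h0 : m / 10 ≠ 0 := by omega
  have hlt : m / 10 < m := Nat.div_lt_self (by omega) (by omega)
  conv_lhs => rw [Nat.toDigits]
  conv_lhs => rw [Nat.toDigitsCore]
  rw [if_neg h0, pv_toDigitsCore_acc m (m / 10) _ (by omega),
    pv_toDigitsCore_fuel m (m / 10 + 1) (m / 10) (by omega) (by omega)]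
  rfl

theorem pv_toDigits_len_mono (a b : Nat) (hab : a ≤ b) :
    (Nat.toDigits 10 a).length ≤ (Nat.toDigits 10 b).length := by
  induction b using Nat.strong_induction_on generalizing a with
  | _ b ih =>
    by_cases hb : b < 10
    · rw [pv_toDigits_lt a (by omega), pv_toDigits_lt b hb]
      simp
    · by_cases ha : a < 10
      · rw [pv_toDigits_lt a ha, pv_toDigits_ge b (by omega)]
        simp
      · rw [pv_toDigits_ge a (by omega), pv_toDigits_ge b (by omega)]
        simp only [List.length_append, List.length_singleton]
        have := ih (b / 10) (Nat.div_lt_self (by omega) (by omega)) (a / 10)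
          (Nat.div_le_div_right hab)
        omega

theorem pv_toDigits_chars (m : Nat) : ∀ ch ∈ Nat.toDigits 10 m, ∃ k, k < 10 ∧ ch = Nat.digitChar k := by
  induction m using Nat.strong_induction_on with
  | _ m ih =>
    by_cases h : m < 10
    · rw [pv_toDigits_lt m h]
      intro ch hch
      exact ⟨m, h, by simpa using hch⟩
    · rw [pv_toDigits_ge m (by omega)]
      intro ch hch
      rcases List.mem_append.mp hch with h1 | h1
      · exact ih (m / 10) (Nat.div_lt_self (by omega) (by omega)) ch h1
      · exact ⟨m % 10, Nat.mod_lt _ (by omega), by simpa using h1⟩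

theorem pv_digitChar_ne_sign (k : Nat) (h : k < 10) :
    Nat.digitChar k ≠ '+' ∧ Nat.digitChar k ≠ '-' := by
  interval_cases k <;> decide

theorem pv_toDigits_ne_nil (m : Nat) : Nat.toDigits 10 m ≠ [] := by
  by_cases h : m < 10
  · rw [pv_toDigits_lt m h]; simp
  · rw [pv_toDigits_ge m (by omega)]; simp

theorem pv_zfill_toDigits (m w : Nat) (h : (Nat.toDigits 10 m).length ≤ w) :
    PySem.Chars.zfill (Nat.toDigits 10 m) (w : Int)
      = List.replicate (w - (Nat.toDigits 10 m).length) '0' ++ Nat.toDigits 10 m := by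
  rcases Nat.lt_or_ge (Nat.toDigits 10 m).length w with hlt | hge
  · simp only [PySem.Chars.zfill]
    rw [if_neg (by exact_mod_cast Nat.not_le.mpr hlt)]
    match hd : Nat.toDigits 10 m with
    | [] => exact absurd hd (pv_toDigits_ne_nil m)
    | c :: rest =>
      have hc : ∃ k, k < 10 ∧ c = Nat.digitChar k := pv_toDigits_chars m c (by rw [hd]; simp)
      obtain ⟨k, hk, rfl⟩ := hc
      have hsign := pv_digitChar_ne_sign k hk
      simp [hsign.1, hsign.2]
  · have : (Nat.toDigits 10 m).length = w := le_antisymm h hge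
    simp only [PySem.Chars.zfill]
    rw [if_pos (by exact_mod_cast le_of_eq this.symm)]
    simp [this]

theorem pv_padded_digits (w : Nat) : ∀ (m : Nat), (Nat.toDigits 10 m).length ≤ w →
    List.replicate (w - (Nat.toDigits 10 m).length) '0' ++ Nat.toDigits 10 m
      = (List.range w).map (fun k => Nat.digitChar (m / 10 ^ (w - 1 - k) % 10)) := by
  induction w with
  | zero =>
    intro m h
    have := pv_toDigits_ne_nil m
    cases hd : Nat.toDigits 10 m with
    | nil => exact absurd hd this
    | cons c rest => rw [hd] at h; simp at h
  | succ w ih =>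
    intro m h
    have hsplit : (List.range (w + 1)).map (fun k => Nat.digitChar (m / 10 ^ (w + 1 - 1 - k) % 10))
        = (List.range w).map (fun k => Nat.digitChar (m / 10 / 10 ^ (w - 1 - k) % 10))
          ++ [Nat.digitChar (m % 10)] := by
      rw [List.range_succ, List.map_append]
      congr 1
      · apply List.map_congr_left
        intro k hk
        have hk' : k < w := List.mem_range.mp hk
        have : w + 1 - 1 - k = (w - 1 - k) + 1 := by omega
        rw [this, pow_succ, Nat.div_div_eq_div_mul, Nat.mul_comm]
      · simp
    rw [hsplit]
    by_cases hm : m < 10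
    · rw [pv_toDigits_lt m hm]
      have hz : ∀ k ∈ List.range w, Nat.digitChar (m / 10 / 10 ^ (w - 1 - k) % 10) = '0' := by
        intro k _
        rw [Nat.div_eq_of_lt hm]
        simp [Nat.digitChar]
      rw [List.map_congr_left hz]
      simp [List.map_const', Nat.mod_eq_of_lt hm]
    · rw [pv_toDigits_ge m (by omega)]
      have hlen : (Nat.toDigits 10 (m / 10)).length ≤ w := by
        have := pv_toDigits_ge m (by omega)
        have hl : (Nat.toDigits 10 m).length = (Nat.toDigits 10 (m / 10)).length + 1 := by
          rw [this]; simp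
        omega
      rw [← ih (m / 10) hlen]
      simp only [List.length_append, List.length_singleton]
      rw [show w + 1 - ((Nat.toDigits 10 (m / 10)).length + 1) = w - (Nat.toDigits 10 (m / 10)).length by omega]
      simp [List.append_assoc]

theorem pv_digitChar_eq_zero_iff (k : Nat) (h : k < 10) : Nat.digitChar k = '0' ↔ k = 0 := by
  interval_cases k <;> decide

theorem pv_intercalate_append (s : List Char) : ∀ (rows : List (List Char)), rows ≠ [] →
    List.intercalate s rows ++ s = rows.flatMap (fun r => r ++ s) := by
  intro rows
  induction rows with
  | nil => intro h; exact absurd rfl h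
  | cons x t ih =>
    intro _
    cases t with
    | nil => simp [List.intercalate]
    | cons y t' =>
      have h2 := ih (by simp)
      have hcc : List.intercalate s (x :: y :: t') = x ++ s ++ List.intercalate s (y :: t') := by
        simp [List.intercalate, List.intersperse]
      rw [hcc, List.flatMap_cons, ← h2]
      simp

-- the per-cell equality: A's arithmetic digit is B's zfill-string character
theorem pv_cell_eq (n c : Int) (W : Nat) (k : Nat) (blankL : List Char)
    (hc0 : 0 ≤ c) (hcn : c < n) (hk : k < W)
    (hW : (Nat.toDigits 10 (n - 1).toNat).length ≤ W) :
    (if ((W : Int) - 1 - k ≠ 0 ∧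
          PySem.Int.mod (PySem.Int.floordiv c ((10:Int) ^ ((W : Int) - 1 - k).toNat)) 10 = 0)
      then blankL
      else PySem.Int.toChars (PySem.Int.mod (PySem.Int.floordiv c ((10:Int) ^ ((W : Int) - 1 - k).toNat)) 10))
    = (if (k ≠ W - 1 ∧ PySem.List.pyGetD (PySem.Chars.zfill (PySem.Int.toChars c) (W : Int)) (k : Int) ' ' = '0')
      then blankL
      else [PySem.List.pyGetD (PySem.Chars.zfill (PySem.Int.toChars c) (W : Int)) (k : Int) ' ']) := by
  set m : Nat := c.toNat with hm
  have hcm : c = (m : Int) := (Int.toNat_of_nonneg hc0).symm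
  have hd : ((W : Int) - 1 - k).toNat = W - 1 - k := by omega
  have hdig : PySem.Int.mod (PySem.Int.floordiv c ((10:Int) ^ ((W : Int) - 1 - k).toNat)) 10
      = ((m / 10 ^ (W - 1 - k) % 10 : Nat) : Int) := by
    rw [hcm, hd, show ((10:Int) ^ (W - 1 - k)) = ((10 ^ (W - 1 - k) : Nat) : Int) by push_cast; ring]
    rw [PySem.Int.floordiv_natCast, show (10:Int) = ((10:Nat):Int) from rfl, PySem.Int.mod_natCast]
  -- B's character
  have hlenm : (Nat.toDigits 10 m).length ≤ W := by
    refine le_trans (pv_toDigits_len_mono m (n - 1).toNat (by omega)) hW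
  have hchars : PySem.Int.toChars c = Nat.toDigits 10 m := by
    rw [hcm]; simp [PySem.Int.toChars]
  have hch : PySem.List.pyGetD (PySem.Chars.zfill (PySem.Int.toChars c) (W : Int)) (k : Int) ' '
      = Nat.digitChar (m / 10 ^ (W - 1 - k) % 10) := by
    rw [hchars, pv_zfill_toDigits m W hlenm, pv_padded_digits W m hlenm]
    rw [PySem.List.pyGetD_natCast]
    rw [List.getD_eq_getElem?_getD, List.getElem?_map, List.getElem?_range hk]
    simp
  have hlt10 : m / 10 ^ (W - 1 - k) % 10 < 10 := Nat.mod_lt _ (by omega)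
  have hcond : (((W : Int) - 1 - k ≠ 0 ∧
      PySem.Int.mod (PySem.Int.floordiv c ((10:Int) ^ ((W : Int) - 1 - k).toNat)) 10 = 0)
      ↔ (k ≠ W - 1 ∧ PySem.List.pyGetD (PySem.Chars.zfill (PySem.Int.toChars c) (W : Int)) (k : Int) ' ' = '0')) := by
    rw [hdig, hch, pv_digitChar_eq_zero_iff _ hlt10]
    constructor
    · rintro ⟨h1, h2⟩
      refine ⟨by omega, by exact_mod_cast h2⟩
    · rintro ⟨h1, h2⟩
      refine ⟨by omega, by exact_mod_cast h2⟩
  by_cases hA : ((W : Int) - 1 - k ≠ 0 ∧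
      PySem.Int.mod (PySem.Int.floordiv c ((10:Int) ^ ((W : Int) - 1 - k).toNat)) 10 = 0)
  · rw [if_pos hA, if_pos (hcond.mp hA)]
  · rw [if_neg hA, if_neg (fun h => hA (hcond.mpr h))]
    rw [hch, hdig]
    simp only [PySem.Int.toChars]
    rw [if_neg (by exact not_lt.mpr (Int.natCast_nonneg _)), Int.toNat_natCast]
    exact pv_toDigits_lt _ hlt10

-- ===== VERDICT (by name: the statement is the Claim_ definition above) =====
theorem displayNumbersHorizontal_spec : Claim_equal_displayNumbersHorizontal := by
  intro number blank indent _
  unfold Spec_displayNumbersHorizontal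
  cases number with
  | none => rfl
  | some n =>
    simp only [displayNumbersHorizontal, displayNumbersHorizontal_alt]
    congr 1
    set W : Nat := (PySem.Int.toChars (n - 1)).length with hWdef
    set pre : List Char := List.replicate indent.toNat ' ' with hpre
    have hW1 : 1 ≤ W := by
      rw [hWdef]
      simp only [PySem.Int.toChars]
      split
      · simp
      · exact List.length_pos_of_ne_nil (pv_toDigits_ne_nil _)
    have hrange : PySem.List.pyRange ((W : Int) - 1) (-1) (-1)
        = (List.range W).map (fun (k : Nat) => (W : Int) - 1 - (k : Int)) := by
      rw [PySem.List.pyRange_neg_one, show ((W:Int) - 1 - (-1)).toNat = W by omega]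
    -- A's nested foldl as a flatMap over rows
    have hstep : (fun (rv : List Char) (d : Int) =>
        ((PySem.List.pyRange 0 n 1).foldl (fun rv c =>
          rv ++ (if d ≠ 0 ∧ PySem.Int.mod (PySem.Int.floordiv c ((10:Int) ^ d.toNat)) 10 = 0
            then blank.toList
            else PySem.Int.toChars (PySem.Int.mod (PySem.Int.floordiv c ((10:Int) ^ d.toNat)) 10)))
          (rv ++ pre)) ++ ['\n'])
        = (fun (rv : List Char) (d : Int) =>
          rv ++ (pre ++ (PySem.List.pyRange 0 n 1).flatMap (fun c =>
            (if d ≠ 0 ∧ PySem.Int.mod (PySem.Int.floordiv c ((10:Int) ^ d.toNat)) 10 = 0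
            then blank.toList
            else PySem.Int.toChars (PySem.Int.mod (PySem.Int.floordiv c ((10:Int) ^ d.toNat)) 10))) ++ ['\n'])) := by
      funext rv d
      rw [PySem.List.foldl_append_eq_flatMap]
      simp [List.append_assoc]
    rw [hstep, PySem.List.foldl_append_eq_flatMap, List.nil_append, hrange, List.flatMap_map]
    -- B's rows as the same flatMap
    have hrows_ne : ((List.range W).map (fun r =>
        pre ++ (((PySem.List.pyRange 0 n 1).map (fun c =>
          PySem.Chars.zfill (PySem.Int.toChars c) (W : Int))).map (fun s =>
          if r ≠ W - 1 ∧ PySem.List.pyGetD s (r : Int) ' ' = '0'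
          then blank.toList else [PySem.List.pyGetD s (r : Int) ' '])).flatten)) ≠ [] := by
      simp only [ne_eq, List.map_eq_nil_iff, List.range_eq_nil]
      omega
    rw [pv_intercalate_append _ _ hrows_ne, List.flatMap_map]
    apply List.flatMap_congr
    intro k hk
    have hkW : k < W := List.mem_range.mp hk
    simp only [List.flatMap_def.symm, List.flatMap_map, List.append_assoc]
    congr 1
    congr 1
    apply List.flatMap_congr
    intro c hc
    obtain ⟨hc0, hcn⟩ := PySem.List.mem_pyRange_one.mp hc
    have hn1 : 0 ≤ n - 1 := by omega
    have hWD : (Nat.toDigits 10 (n - 1).toNat).length ≤ W := by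
      rw [hWdef]
      simp only [PySem.Int.toChars]
      rw [if_neg (by omega)]
    exact pv_cell_eq n c W k blank.toList hc0 hcn hkW hWD
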